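-- pv_equiv track=rewrite | github.com/yb173/atcoder-playground | abc/abc100/c/abc100_c.py | countDivide2
-- ===== SOURCE A (Python) =====
-- def countDivide2(x: int):
--     cnt = 0
--     while x > 0:
--         if x % 2 != 0:
--             return cnt
--         cnt += 1
--         x //= 2
--     return cnt
-- ===== SOURCE B (Python) =====
-- def countDivide2(x: int):
--     if x <= 0:
--         return 0
--     return (x & -x).bit_length() - 1
-- ===== Notes on version B (the rewrite author's own statement) =====
-- stated objective: idiomatic
-- what changed: Replaces the divide-by-2 loop with the closed-form bit trick (x & -x).bit_length() - 1 (count of trailing zero bits), with an explicit 0 for x <= 0 matching the loop's immediately-false guard.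
import Mathlib
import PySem

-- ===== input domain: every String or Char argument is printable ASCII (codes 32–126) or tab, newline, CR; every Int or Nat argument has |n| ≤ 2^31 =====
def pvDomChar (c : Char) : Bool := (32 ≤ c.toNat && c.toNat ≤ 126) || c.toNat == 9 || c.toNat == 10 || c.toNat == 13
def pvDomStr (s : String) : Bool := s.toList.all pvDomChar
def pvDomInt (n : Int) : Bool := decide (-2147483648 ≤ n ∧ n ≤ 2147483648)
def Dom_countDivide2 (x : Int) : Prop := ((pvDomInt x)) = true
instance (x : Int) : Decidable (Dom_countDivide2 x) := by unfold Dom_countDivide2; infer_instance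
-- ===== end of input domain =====

-- B replaces A's divide-by-2 loop with the closed-form bit expression (x & -x).bit_length() - 1 (idiomatic, no loop).

-- ===== PORT A =====
def countDivide2Go (x : Int) (cnt : Int) : Int :=
  if h : 0 < x then
    if PySem.Int.mod x 2 ≠ 0 then cnt
    else countDivide2Go (PySem.Int.floordiv x 2) (cnt + 1)
  else cnt
termination_by x.toNat
decreasing_by
  rw [PySem.Int.floordiv_eq_ediv_of_pos (by omega)]
  omega

def countDivide2 (x : Int) : Int := countDivide2Go x 0

-- ===== PORT B =====
def countDivide2_alt (x : Int) : Int :=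
  if x ≤ 0 then 0
  else (PySem.Int.bitLength (PySem.Int.band x (-x)) : Int) - 1

-- ===== PRECONDITION & SPEC =====
def Spec_countDivide2 (x : Int) (out : Int) : Prop := out = countDivide2_alt x
instance (x : Int) (out : Int) : Decidable (Spec_countDivide2 x out) := by unfold Spec_countDivide2; infer_instance

-- ===== CLAIM (what is proved, stated in full; the proofs are below) =====
def Claim_equal_countDivide2 : Prop := ∀ (x : Int), Dom_countDivide2 x → Spec_countDivide2 x (countDivide2 x)

-- ===== LEMMAS AND PROOFS =====

-- n odd: n &&& (n-1) clears the low bit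
lemma land_pred_odd (m : Nat) : (2 * m + 1) &&& (2 * m) = 2 * m := by
  have h := Nat.land_bit true m false m
  simpa [Nat.bit] using h

-- n even, n = 2m (m > 0): land halves
lemma land_pred_even (m : Nat) (hm : 0 < m) :
    (2 * m) &&& (2 * m - 1) = 2 * (m &&& (m - 1)) := by
  have h := Nat.land_bit false m true (m - 1)
  have e : 2 * m - 1 = 2 * (m - 1) + 1 := by omega
  rw [e]
  simpa [Nat.bit] using h

lemma land_pred_lt (m : Nat) (hm : 0 < m) : m &&& (m - 1) < m := by
  have h : m &&& (m - 1) ≤ m - 1 := Nat.and_le_right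
  omega

-- main loop/closed-form correspondence, over Nat
lemma countDivide2Go_eq (n : Nat) (hn : 0 < n) : ∀ cnt : Int,
    countDivide2Go (n : Int) cnt
      = cnt + (PySem.Int.bitLength ((n - (n &&& (n - 1)) : Nat) : Int) : Int) - 1 := by
  induction n using Nat.strong_induction_on with
  | _ n ih =>
    intro cnt
    rcases Nat.even_or_odd n with ⟨m, hm⟩ | ⟨m, hm⟩
    · -- n = m + m, even
      have hm2 : n = 2 * m := by omega
      have hmp : 0 < m := by omega
      rw [countDivide2Go]
      have hx : (0:Int) < (n:Int) := by exact_mod_cast hn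
      rw [dif_pos hx]
      have hn2 : (n:Int) = 2 * (m:Int) := by exact_mod_cast hm2
      have hmod : PySem.Int.mod (n:Int) 2 = 0 := by
        rw [PySem.Int.mod_eq_emod_of_pos (by norm_num)]
        omega
      rw [if_neg (by rw [hmod]; simp)]
      have hfd : PySem.Int.floordiv (n:Int) 2 = ((m : Nat) : Int) := by
        rw [PySem.Int.floordiv_eq_ediv_of_pos (by norm_num)]
        omega
      rw [hfd, ih m (by omega) hmp (cnt + 1)]
      have hland : n - (n &&& (n - 1)) = 2 * (m - (m &&& (m - 1))) := by
        rw [hm2, land_pred_even m hmp, Nat.mul_sub]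
      have hpos : 0 < m - (m &&& (m - 1)) := by
        have := land_pred_lt m hmp; omega
      have hbl : PySem.Int.bitLength ((n - (n &&& (n - 1)) : Nat) : Int)
          = PySem.Int.bitLength ((m - (m &&& (m - 1)) : Nat) : Int) + 1 := by
        rw [hland]
        rw [PySem.Int.bitLength_natCast (m := 2 * (m - (m &&& (m - 1)))) (by omega)]
        congr 2
        omega
      rw [hbl]
      push_cast
      ring
    · -- n = 2m + 1, odd
      rw [countDivide2Go]
      have hx : (0:Int) < (n:Int) := by exact_mod_cast hn
      rw [dif_pos hx]
      have hn2 : (n:Int) = 2 * (m:Int) + 1 := by exact_mod_cast hm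
      have hmod : PySem.Int.mod (n:Int) 2 = 1 := by
        rw [PySem.Int.mod_eq_emod_of_pos (by norm_num)]
        omega
      rw [if_pos (by rw [hmod]; norm_num)]
      have hland : n - (n &&& (n - 1)) = 1 := by
        have h1 : n &&& (n - 1) = 2 * m := by
          have := land_pred_odd m
          rw [hm]
          simpa [show 2 * m + 1 - 1 = 2 * m by omega, two_mul] using this
        omega
      rw [hland]
      norm_num [show PySem.Int.bitLength (1:Int) = 1 from by decide]

lemma band_neg_self (n : Nat) (hn : 0 < n) :
    PySem.Int.band (n : Int) (-(n : Int)) = ((n - (n &&& (n - 1)) : Nat) : Int) := by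
  have h1 : (0:Int) ≤ (n:Int) := by positivity
  have h2 : ¬ (0:Int) ≤ -(n:Int) := by
    simp only [not_le]
    exact_mod_cast Int.neg_neg_of_pos (by exact_mod_cast hn)
  simp only [PySem.Int.band, if_pos h1, if_neg h2]
  congr 1
  have e1 : (- -(n:Int) - 1).toNat = n - 1 := by omega
  have e2 : ((n:Int)).toNat = n := by omega
  rw [e1, e2]

-- ===== VERDICT (by name: the statement is the Claim_ definition above) =====
theorem countDivide2_spec : Claim_equal_countDivide2 := by
  intro x _
  unfold Spec_countDivide2 countDivide2 countDivide2_alt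
  by_cases hx : 0 < x
  · rw [if_neg (by omega)]
    have hxn : x = ((x.toNat : Nat) : Int) := by omega
    have hn : 0 < x.toNat := by omega
    rw [hxn, countDivide2Go_eq x.toNat hn 0, band_neg_self x.toNat hn]
    ring
  · rw [countDivide2Go, dif_neg hx, if_pos (by omega)]
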